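-- pv_equiv track=rewrite | github.com/Aleksandra-Atanova/python_mail.ru_homework | passengers/passangers.py | find_trains_to_switch
-- ===== SOURCE A (Python) =====
-- def find_trains_to_switch(trains, event):
--     train_from_index = -1
--     train_to_index = -1
--     for current_train_index in range(len(trains)):
--         if event['train_from'] in trains[current_train_index]['name']:
--             train_from_index = current_train_index
--         if event['train_to'] in trains[current_train_index]['name']:
--             train_to_index = current_train_index
--     return train_from_index, train_to_index
-- ===== SOURCE B (Python) =====
-- def find_trains_to_switch(trains, event):
--     train_from_index = -1
--     for i in range(len(trains) - 1, -1, -1):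
--         if event['train_from'] in trains[i]['name']:
--             train_from_index = i
--             break
--     train_to_index = -1
--     for i in range(len(trains) - 1, -1, -1):
--         if event['train_to'] in trains[i]['name']:
--             train_to_index = i
--             break
--     return train_from_index, train_to_index
-- ===== Notes on version B (the rewrite author's own statement) =====
-- stated objective: alternative
-- what changed: Replaced the single forward pass that overwrites both indices on every match with two independent reverse scans that break at the first (i.e. last) matching train.
import Mathlib
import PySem

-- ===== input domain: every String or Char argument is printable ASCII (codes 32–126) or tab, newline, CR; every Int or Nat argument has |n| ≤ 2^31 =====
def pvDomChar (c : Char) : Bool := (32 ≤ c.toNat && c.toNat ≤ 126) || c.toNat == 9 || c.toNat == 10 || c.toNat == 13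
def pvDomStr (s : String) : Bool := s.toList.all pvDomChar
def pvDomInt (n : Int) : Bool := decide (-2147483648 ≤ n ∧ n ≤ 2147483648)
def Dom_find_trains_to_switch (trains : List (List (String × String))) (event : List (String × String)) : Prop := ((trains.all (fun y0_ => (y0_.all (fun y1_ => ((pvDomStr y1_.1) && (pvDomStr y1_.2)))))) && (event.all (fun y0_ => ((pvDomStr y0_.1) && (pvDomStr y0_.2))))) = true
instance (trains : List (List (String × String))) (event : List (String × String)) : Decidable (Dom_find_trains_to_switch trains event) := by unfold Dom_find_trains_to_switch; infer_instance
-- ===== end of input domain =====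

-- B replaces A's single forward pass (which overwrites both indices on every match)
-- with two independent early-exiting reverse scans; return values agree on all inputs
-- where the Python A returns (Pre_ below excludes A's KeyErrors).

-- trains[i]['name']; inside Pre_ every lookup succeeds, the defaults are never used
def pvNameOf (trains : List (List (String × String))) (i : Int) : String :=
  (PySem.Dict.mk ((PySem.List.pyGet? trains i).getD [])).getD "name" ""

-- ===== PORT A =====
def find_trains_to_switch (trains : List (List (String × String))) (event : List (String × String)) : Int × Int :=
  (PySem.List.pyRange 0 (trains.length : Int) 1).foldl
    (fun (st : Int × Int) i =>
      let st1 := if PySem.Str.isIn ((PySem.Dict.mk event).getD "train_from" "") (pvNameOf trains i) then (i, st.2) else st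
      if PySem.Str.isIn ((PySem.Dict.mk event).getD "train_to" "") (pvNameOf trains i) then (st1.1, i) else st1)
    ((-1 : Int), (-1 : Int))

-- ===== PORT B =====
-- reverse scan for i in range(len(trains)-1, -1, -1), break at first match
def pvRevScan (trains : List (List (String × String))) (sub : String) : Nat → Int
  | 0 => -1
  | k + 1 => if PySem.Str.isIn sub (pvNameOf trains (k : Int)) then (k : Int) else pvRevScan trains sub k

def find_trains_to_switch_alt (trains : List (List (String × String))) (event : List (String × String)) : Int × Int :=
  (pvRevScan trains ((PySem.Dict.mk event).getD "train_from" "") trains.length,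
   pvRevScan trains ((PySem.Dict.mk event).getD "train_to" "") trains.length)

-- ===== PRECONDITION & SPEC =====
-- Pre_ excludes exactly the inputs where the Python A raises KeyError: a train without
-- a 'name' key, or (when there is at least one train) an event missing 'train_from'/'train_to'.
def Pre_find_trains_to_switch (trains : List (List (String × String))) (event : List (String × String)) : Prop :=
  (trains.all (fun t => (PySem.Dict.mk t).contains "name")) = true ∧
  (trains ≠ [] → ((PySem.Dict.mk event).contains "train_from" = true ∧ (PySem.Dict.mk event).contains "train_to" = true))

instance (trains : List (List (String × String))) (event : List (String × String)) : Decidable (Pre_find_trains_to_switch trains event) := by unfold Pre_find_trains_to_switch; infer_instance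

def pvWitness_find_trains_to_switch : (List (List (String × String))) × (List (String × String)) :=
  ([[("name", "red arrow")], [("name", "blue arrow")]], [("train_from", "red"), ("train_to", "arrow")])

def Spec_find_trains_to_switch (trains : List (List (String × String))) (event : List (String × String)) (out : Int × Int) : Prop := out = find_trains_to_switch_alt trains event
instance (trains : List (List (String × String))) (event : List (String × String)) (out : Int × Int) : Decidable (Spec_find_trains_to_switch trains event out) := by unfold Spec_find_trains_to_switch; infer_instance

-- ===== CLAIM (what is proved, stated in full; the proofs are below) =====
def Claim_equal_find_trains_to_switch : Prop := ∀ (trains : List (List (String × String))) (event : List (String × String)), Dom_find_trains_to_switch trains event → Pre_find_trains_to_switch trains event → Spec_find_trains_to_switch trains event (find_trains_to_switch trains event)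

-- ===== LEMMAS AND PROOFS =====

-- A's fused forward fold over range(n) computes, componentwise, B's reverse scans.
theorem pv_fold_eq_revScan (trains : List (List (String × String))) (sf st : String) :
    ∀ n : Nat,
      (PySem.List.pyRange 0 (n : Int) 1).foldl
        (fun (s : Int × Int) i =>
          let s1 := if PySem.Str.isIn sf (pvNameOf trains i) then (i, s.2) else s
          if PySem.Str.isIn st (pvNameOf trains i) then (s1.1, i) else s1)
        ((-1 : Int), (-1 : Int))
      = (pvRevScan trains sf n, pvRevScan trains st n) := by
  intro n
  induction n with
  | zero => simp [PySem.List.pyRange, pvRevScan]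
  | succ k ih =>
      have hsplit : PySem.List.pyRange 0 ((k + 1 : Nat) : Int) 1
          = PySem.List.pyRange 0 (k : Nat) 1 ++ PySem.List.pyRange (k : Nat) ((k + 1 : Nat) : Int) 1 := by
        apply PySem.List.pyRange_one_append <;> push_cast <;> omega
      have hlast : PySem.List.pyRange (k : Nat) ((k + 1 : Nat) : Int) 1 = [(k : Int)] := by
        rw [PySem.List.pyRange_one_cons (by push_cast; omega)]
        have : PySem.List.pyRange ((k : Int) + 1) ((k + 1 : Nat) : Int) 1 = [] := by
          simp [PySem.List.pyRange]
        simp [this]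
      rw [hsplit, hlast, List.foldl_append, ih]
      simp only [List.foldl_cons, List.foldl_nil, pvRevScan]
      by_cases h1 : PySem.Chars.isIn sf.toList (pvNameOf trains (k : Int)).toList = true <;>
        by_cases h2 : PySem.Chars.isIn st.toList (pvNameOf trains (k : Int)).toList = true <;>
        simp [h1, h2]

-- ===== VERDICT (by name: the statement is the Claim_ definition above) =====
theorem find_trains_to_switch_spec : Claim_equal_find_trains_to_switch := by
  intro trains event _ _
  unfold Spec_find_trains_to_switch find_trains_to_switch find_trains_to_switch_alt
  exact pv_fold_eq_revScan trains _ _ trains.length
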